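-- pv_equiv track=rewrite | github.com/csboyer/RFID-BTS | python/rfidbts_downlink.py | make2_crc_5
-- ===== SOURCE A (Python) =====
-- def make2_crc_5(bit_stream):
--     bit_stream2 = bit_stream + "00000"
--     poly = "101001"
--     for i in range(len(bit_stream)):
--         if bit_stream2[0] == "1":
--             bit_stream2 = string_xor(bit_stream2[0:6], poly) + bit_stream2[6:]
--         bit_stream2 = bit_stream2[1:]
--     return bit_stream2
--
-- def string_xor(str1, str2):
--     out = ""
--     for i in range(len(str1)):
--         if str1[i] != str2[i]:
--             out = out[:(i)] + '1' + out[(i+1):]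
--         else:
--             out = out[:(i)] + '0' + out[(i+1):]
--     return out
-- ===== SOURCE B (Python) =====
-- def make2_crc_5(bit_stream):
--     # One pass with a 5-cell shift-register window instead of rebuilding the whole string.
--     s = bit_stream + "00000"
--     win = list(s[:5])
--     for nxt in s[5:]:
--         c = win.pop(0)
--         win.append(nxt)
--         if c == '1':
--             win = ['1' if a != b else '0' for a, b in zip(win, "01001")]
--     return ''.join(win)
-- ===== Notes on version B (the rewrite author's own statement) =====
-- stated objective: faster
-- what changed: A repeatedly slices and rebuilds the whole remaining string each round (and string_xor itself rebuilds its output string per character); B makes a single left-to-right pass keeping only a 5-cell shift-register window, xoring the window in place when the popped cell is '1'.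
import Mathlib
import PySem

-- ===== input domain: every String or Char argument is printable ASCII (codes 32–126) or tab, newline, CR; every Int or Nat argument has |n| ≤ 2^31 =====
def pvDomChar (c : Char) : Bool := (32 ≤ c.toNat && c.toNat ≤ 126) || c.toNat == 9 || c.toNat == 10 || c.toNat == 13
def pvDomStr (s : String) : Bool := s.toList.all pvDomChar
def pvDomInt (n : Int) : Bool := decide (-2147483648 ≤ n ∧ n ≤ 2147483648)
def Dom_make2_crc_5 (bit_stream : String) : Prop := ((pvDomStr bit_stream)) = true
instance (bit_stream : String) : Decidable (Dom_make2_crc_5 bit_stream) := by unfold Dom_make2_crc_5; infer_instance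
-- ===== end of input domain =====

-- B replaces A's per-round whole-string slicing and rebuilding by a single pass that keeps
-- only a 5-cell shift-register window (objective: faster — one pass instead of rebuilds).

-- ===== PORT A =====
-- helper string_xor of Source A, on List Char (out[:i] / out[i+1:] via PySem slices)
def pvStringXor (str1 str2 : List Char) : List Char :=
  (PySem.List.pyRange 0 str1.length 1).foldl
    (fun out i =>
      if PySem.List.pyGet? str1 i ≠ PySem.List.pyGet? str2 i then
        PySem.List.slice out none (some i) ++ ['1'] ++ PySem.List.slice out (some (i + 1)) none
      else
        PySem.List.slice out none (some i) ++ ['0'] ++ PySem.List.slice out (some (i + 1)) none)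
    []

def pvPoly : List Char := ['1', '0', '1', '0', '0', '1']

-- the body of A's for-loop: test bit_stream2[0], conditionally xor the first 6 with poly, drop 1
def pvAStep (bs : List Char) : List Char :=
  let bs2 :=
    if PySem.List.pyGet? bs 0 = some '1' then
      pvStringXor (PySem.List.slice bs (some 0) (some 6)) pvPoly ++ PySem.List.slice bs (some 6) none
    else bs
  PySem.List.slice bs2 (some 1) none

def make2_crc_5 (bit_stream : String) : String :=
  let l := bit_stream.toList
  let init := l ++ ['0', '0', '0', '0', '0']
  String.ofList ((PySem.List.pyRange 0 l.length 1).foldl (fun bs _ => pvAStep bs) init)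

-- ===== PORT B =====
-- ['1' if a != b else '0' for a, b in zip(win, "01001")]
def pvXor5 (w : List Char) : List Char :=
  List.zipWith (fun a b => if a ≠ b then '1' else '0') w ['0', '1', '0', '0', '1']

-- body of Source B's loop: pop the front cell, append the incoming char, xor if the popped cell was '1'
def pvBStep (win : List Char) (nxt : Char) : List Char :=
  match win with
  | [] => []            -- unreachable: the window always holds 5 cells
  | c :: rest =>
    let w := rest ++ [nxt]
    if c = '1' then pvXor5 w else w

def make2_crc_5_alt (bit_stream : String) : String :=
  let s := bit_stream.toList ++ ['0', '0', '0', '0', '0']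
  String.ofList ((s.drop 5).foldl pvBStep (s.take 5))

-- ===== PRECONDITION & SPEC =====
def Spec_make2_crc_5 (bit_stream : String) (out : String) : Prop := out = make2_crc_5_alt bit_stream
instance (bit_stream : String) (out : String) : Decidable (Spec_make2_crc_5 bit_stream out) := by unfold Spec_make2_crc_5; infer_instance

-- ===== CLAIM (what is proved, stated in full; the proofs are below) =====
def Claim_equal_make2_crc_5 : Prop := ∀ (bit_stream : String), Dom_make2_crc_5 bit_stream → Spec_make2_crc_5 bit_stream (make2_crc_5 bit_stream)

-- ===== LEMMAS AND PROOFS =====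

-- zipWith already stops at the shorter list, so truncating the longer one changes nothing
lemma pv_zipWith_take (f : Char → Char → Char) : ∀ (l1 l2 : List Char),
    List.zipWith f l1 (l2.take l1.length) = List.zipWith f l1 l2 := by
  intro l1
  induction l1 with
  | nil => simp
  | cons a t ih => intro l2; cases l2 <;> simp [ih]

-- loop invariant of string_xor: after n rounds, out is the zipWith-xor of the first n chars
lemma pv_xor_aux (str1 str2 : List Char) (hle : str1.length ≤ str2.length) :
    ∀ n : Nat, n ≤ str1.length →
    (PySem.List.pyRange 0 (n : Int) 1).foldl
      (fun out i =>
        if PySem.List.pyGet? str1 i ≠ PySem.List.pyGet? str2 i then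
          PySem.List.slice out none (some i) ++ ['1'] ++ PySem.List.slice out (some (i + 1)) none
        else
          PySem.List.slice out none (some i) ++ ['0'] ++ PySem.List.slice out (some (i + 1)) none)
      [] =
    List.zipWith (fun a b => if a ≠ b then '1' else '0') (str1.take n) (str2.take n) := by
  intro n
  induction n with
  | zero => intro _; simp [PySem.List.pyRange_one_eq_nil]
  | succ m ih =>
      intro hm
      have h1 : m < str1.length := hm
      have h2 : m < str2.length := lt_of_lt_of_le h1 hle
      have hr : PySem.List.pyRange 0 ((m + 1 : Nat) : Int) 1 =
          PySem.List.pyRange 0 (m : Nat) 1 ++ [(m : Int)] := by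
        have := PySem.List.pyRange_one_succ_right (a := 0) (b := (m : Int)) (by positivity)
        push_cast
        exact this
      rw [hr, List.foldl_append, ih (le_of_lt h1)]
      set out := List.zipWith (fun a b => if a ≠ b then '1' else '0') (str1.take m) (str2.take m) with hout
      have hlen : out.length = m := by
        simp [hout, List.length_zipWith]
        omega
      have hg1 : PySem.List.pyGet? str1 (m : Int) = some str1[m] := by
        simp [PySem.List.pyGet?_natCast, List.getElem?_eq_getElem h1]
      have hg2 : PySem.List.pyGet? str2 (m : Int) = some str2[m] := by
        simp [PySem.List.pyGet?_natCast, List.getElem?_eq_getElem h2]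
      have hs1 : PySem.List.slice out none (some (m : Int)) = out := by
        rw [PySem.List.slice_to out (by positivity)]
        simp [hlen]
      have hs2 : PySem.List.slice out (some ((m : Int) + 1)) none = [] := by
        rw [PySem.List.slice_from out (by positivity)]
        apply List.drop_eq_nil_of_le
        omega
      have htake : ∀ l : List Char, (h : m < l.length) → l.take (m+1) = l.take m ++ [l[m]] := by
        intro l h; rw [List.take_add_one]; simp [List.getElem?_eq_getElem h]
      rw [List.foldl_cons, List.foldl_nil, htake str1 h1, htake str2 h2,
        List.zipWith_append (by simp; omega)]
      simp only [hg1, hg2, hs1, hs2, ← hout]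
      by_cases hc : str1[m] = str2[m] <;> simp [hc]

-- A's string_xor is elementwise xor when the second string is at least as long
lemma pv_xor_eq (str1 str2 : List Char) (hle : str1.length ≤ str2.length) :
    pvStringXor str1 str2 =
      List.zipWith (fun a b => if a ≠ b then '1' else '0') str1 str2 := by
  have := pv_xor_aux str1 str2 hle str1.length le_rfl
  rw [pvStringXor, this, List.take_of_length_le le_rfl, pv_zipWith_take]

-- one round of A's loop on a 5-cell window plus the incoming char is one B step
lemma pv_step_eq (c0 c1 c2 c3 c4 nxt : Char) (rest : List Char) :
    pvAStep (c0 :: c1 :: c2 :: c3 :: c4 :: nxt :: rest) =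
      pvBStep [c0, c1, c2, c3, c4] nxt ++ rest := by
  have h0 : PySem.List.pyGet? (c0 :: c1 :: c2 :: c3 :: c4 :: nxt :: rest) (0 : Int) = some c0 := by
    have h := PySem.List.pyGet?_natCast (c0 :: c1 :: c2 :: c3 :: c4 :: nxt :: rest) 0
    rw [Nat.cast_zero] at h
    rw [h, List.getElem?_cons_zero]
  have hsl06 : PySem.List.slice (c0 :: c1 :: c2 :: c3 :: c4 :: nxt :: rest) (some 0) (some 6) =
      [c0, c1, c2, c3, c4, nxt] := by
    rw [PySem.List.slice_toNat _ (by norm_num) (by norm_num)]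
    simp
  have hsl6 : PySem.List.slice (c0 :: c1 :: c2 :: c3 :: c4 :: nxt :: rest) (some 6) = rest := by
    rw [PySem.List.slice_from _ (by norm_num)]
    simp
  unfold pvAStep
  simp only [h0, hsl06, hsl6]
  by_cases hc : c0 = '1'
  · subst hc
    rw [if_pos rfl, pv_xor_eq _ _ (by simp [pvPoly]), PySem.List.slice_from _ (by norm_num)]
    simp [pvBStep, pvXor5, pvPoly]
  · rw [if_neg (by simp [hc]), PySem.List.slice_from _ (by norm_num)]
    simp [pvBStep, hc]

-- a B step keeps the window at 5 cells
lemma pv_bstep_length (win : List Char) (nxt : Char) (h : win.length = 5) :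
    (pvBStep win nxt).length = 5 := by
  match win, h with
  | [c0, c1, c2, c3, c4], _ =>
    simp only [pvBStep, pvXor5]
    split <;> simp

-- A's index loop ignores its index: it is n-fold iteration of the loop body
lemma pv_foldl_range_iterate (g : List Char → List Char) (b : List Char) (n : Nat) :
    (PySem.List.pyRange 0 (n : Int) 1).foldl (fun bs _ => g bs) b = g^[n] b := by
  induction n with
  | zero => simp [PySem.List.pyRange_one_eq_nil]
  | succ m ih =>
      have hr : PySem.List.pyRange 0 ((m + 1 : Nat) : Int) 1 =
          PySem.List.pyRange 0 (m : Nat) 1 ++ [(m : Int)] := by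
        have := PySem.List.pyRange_one_succ_right (a := 0) (b := (m : Int)) (by positivity)
        push_cast
        exact this
      rw [hr, List.foldl_append, ih, List.foldl_cons, List.foldl_nil,
        Function.iterate_succ_apply']

-- main loop correspondence: iterating A's body over window ++ rest equals B's fold over rest
lemma pv_loop_eq : ∀ (rest win : List Char), win.length = 5 →
    pvAStep^[rest.length] (win ++ rest) = rest.foldl pvBStep win := by
  intro rest
  induction rest with
  | nil => intro win _; simp
  | cons nxt rest ih =>
      intro win h
      match win, h with
      | [c0, c1, c2, c3, c4], _ =>
        rw [List.length_cons, Function.iterate_succ_apply, List.foldl_cons]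
        have hstep := pv_step_eq c0 c1 c2 c3 c4 nxt rest
        simp only [List.cons_append, List.nil_append] at hstep ⊢
        rw [hstep]
        exact ih _ (pv_bstep_length _ _ rfl)

-- ===== VERDICT (by name: the statement is the Claim_ definition above) =====
theorem make2_crc_5_spec : Claim_equal_make2_crc_5 := by
  unfold Claim_equal_make2_crc_5
  intro bs _
  unfold Spec_make2_crc_5 make2_crc_5 make2_crc_5_alt
  simp only
  rw [pv_foldl_range_iterate]
  have hwin : ((bs.toList ++ ['0', '0', '0', '0', '0']).take 5).length = 5 := by
    simp
  have hlen : ((bs.toList ++ ['0', '0', '0', '0', '0']).drop 5).length = bs.toList.length := by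
    simp
  have key := pv_loop_eq ((bs.toList ++ ['0', '0', '0', '0', '0']).drop 5)
    ((bs.toList ++ ['0', '0', '0', '0', '0']).take 5) hwin
  rw [List.take_append_drop, hlen] at key
  rw [key]
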